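-- pv_equiv track=rewrite | github.com/Nivedita967/Data-Structure-and-Algorithms | Leetcode/Reducing Dishes/ReducingDishes.py | maxSatisfaction
-- ===== SOURCE A (Python) =====
-- from typing import List
--
-- def maxSatisfaction(satisfaction: List[int]) -> int:
--     #Sort the satisfaction list in increasing order
--     satisfaction.sort()
--     total, cur, result,  n = 0, 0, 0,  len(satisfaction)
--     #Sum of all satisfaction levels
--     for i in range(n):
--         total += satisfaction[i]
--     #Calculate the current position of like time coefficient
--     while total < 0 and cur < n:
--         total -= satisfaction[cur]
--         cur += 1
--     #Calculate the total sum of like time coefficient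
--     for i in range(cur, n):
--         result += (i-cur+1)*satisfaction[i]
--     return result
-- ===== SOURCE B (Python) =====
-- from typing import List
--
-- def maxSatisfaction(satisfaction: List[int]) -> int:
--     # Same in-place ascending sort as A (mutation preserved), then ONE greedy
--     # pass from the largest dish down: keep a running sum and re-add it per dish.
--     satisfaction.sort()
--     total = 0
--     ans = 0
--     for d in reversed(satisfaction):
--         if total + d > 0:
--             total += d
--             ans += total
--         else:
--             break
--     return ans
-- ===== Notes on version B (the rewrite author's own statement) =====
-- stated objective: simpler
-- what changed: Replaces A's three passes (full sum, skip-while-negative front scan, weighted suffix sum) by a single greedy reverse pass that accumulates a running sum and re-adds it per kept dish, breaking at the first non-positive extension.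
import Mathlib
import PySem

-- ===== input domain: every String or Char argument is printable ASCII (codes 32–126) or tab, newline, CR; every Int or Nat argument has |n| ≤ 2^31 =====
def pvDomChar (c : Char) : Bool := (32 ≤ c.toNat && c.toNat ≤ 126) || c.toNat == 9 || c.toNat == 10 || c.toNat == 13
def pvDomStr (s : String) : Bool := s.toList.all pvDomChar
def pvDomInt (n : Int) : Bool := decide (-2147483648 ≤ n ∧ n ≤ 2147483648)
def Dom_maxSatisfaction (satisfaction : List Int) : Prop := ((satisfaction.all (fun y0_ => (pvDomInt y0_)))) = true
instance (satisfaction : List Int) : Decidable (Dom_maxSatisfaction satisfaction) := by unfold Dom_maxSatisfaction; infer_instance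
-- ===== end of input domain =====

-- B replaces A's three passes by one greedy reverse pass with a running sum (objective: simpler).
-- Both Pythons sort the argument in place; the equivalence proved here is about the RETURN value
-- (the observable mutation — ascending sort — is identical in A and B).

-- ===== PORT A =====
-- 'for i in range(n): total += satisfaction[i]' — the loop walks the sorted list once
-- with the same accumulator; index i ↔ remaining suffix of the list.
def pvSumLoop : List Int → Int → Int
  | [], total => total
  | x :: xs, total => pvSumLoop xs (total + x)

-- 'while total < 0 and cur < n: total -= satisfaction[cur]; cur += 1' — cursor cur ↔ the
-- suffix from cur; returns that suffix (total is dead after the loop, cur enters only via it).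
def pvSkipLoop : List Int → Int → List Int
  | [], _ => []
  | x :: xs, total => if total < 0 then pvSkipLoop xs (total - x) else x :: xs

-- 'for i in range(cur, n): result += (i-cur+1)*satisfaction[i]' — k ↔ i-cur+1.
def pvResLoop : List Int → Int → Int → Int
  | [], _, result => result
  | x :: xs, k, result => pvResLoop xs (k + 1) (result + k * x)

def maxSatisfaction (satisfaction : List Int) : Int :=
  let s := PySem.List.sorted satisfaction (fun x => x) false
  let total := pvSumLoop s 0
  pvResLoop (pvSkipLoop s total) 1 0

-- ===== PORT B =====
-- 'for d in reversed(satisfaction): if total + d > 0: total += d; ans += total else: break'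
def pvGreedyLoop : List Int → Int → Int → Int
  | [], _, ans => ans
  | d :: rest, total, ans =>
      if total + d > 0 then pvGreedyLoop rest (total + d) (ans + (total + d)) else ans

def maxSatisfaction_alt (satisfaction : List Int) : Int :=
  pvGreedyLoop (PySem.List.sorted satisfaction (fun x => x) false).reverse 0 0

-- ===== PRECONDITION & SPEC =====
def Spec_maxSatisfaction (satisfaction : List Int) (out : Int) : Prop := out = maxSatisfaction_alt satisfaction
instance (satisfaction : List Int) (out : Int) : Decidable (Spec_maxSatisfaction satisfaction out) := by unfold Spec_maxSatisfaction; infer_instance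

-- ===== CLAIM (what is proved, stated in full; the proofs are below) =====
def Claim_equal_maxSatisfaction : Prop := ∀ (satisfaction : List Int), Dom_maxSatisfaction satisfaction → Spec_maxSatisfaction satisfaction (maxSatisfaction satisfaction)

-- ===== LEMMAS AND PROOFS =====

-- sum of all prefix sums of r started from a: ws (d::r) a = (a+d) + ws r (a+d)
def pvWs : List Int → Int → Int
  | [], _ => 0
  | d :: rest, a => (a + d) + pvWs rest (a + d)

-- weighted tail sum Σ (k+i)·t[i]
def pvPw : List Int → Int → Int
  | [], _ => 0
  | x :: xs, k => k * x + pvPw xs (k + 1)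

theorem pvSumLoop_eq (l : List Int) (a : Int) : pvSumLoop l a = a + l.sum := by
  induction l generalizing a with
  | nil => simp [pvSumLoop]
  | cons x xs ih => simp [pvSumLoop, ih]; ring

theorem pvResLoop_eq (t : List Int) (k res : Int) : pvResLoop t k res = res + pvPw t k := by
  induction t generalizing k res with
  | nil => simp [pvResLoop, pvPw]
  | cons x xs ih => simp [pvResLoop, pvPw, ih]; ring

theorem pvPw_succ (t : List Int) (k : Int) : pvPw t (k + 1) = pvPw t k + t.sum := by
  induction t generalizing k with
  | nil => simp [pvPw]
  | cons x xs ih => simp [pvPw, ih]; ring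

theorem pvWs_append (r : List Int) (a x : Int) :
    pvWs (r ++ [x]) a = pvWs r a + (a + r.sum + x) := by
  induction r generalizing a with
  | nil => simp [pvWs]
  | cons d rest ih => simp [pvWs, ih]; ring

theorem pvPw_one_eq_ws_reverse (t : List Int) : pvPw t 1 = pvWs t.reverse 0 := by
  induction t with
  | nil => simp [pvPw, pvWs]
  | cons x xs ih =>
      have h2 : pvPw xs 2 = pvPw xs 1 + xs.sum := by simpa using pvPw_succ xs 1
      simp [pvPw, pvWs_append, h2, ih]; ring

-- if appending x cannot extend the kept suffix, B ignores it
theorem pvGreedy_append_drop (r : List Int) (total ans x : Int)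
    (h : total + r.sum + x ≤ 0) :
    pvGreedyLoop (r ++ [x]) total ans = pvGreedyLoop r total ans := by
  induction r generalizing total ans with
  | nil =>
      rw [List.sum_nil] at h
      simp [pvGreedyLoop, if_neg (by omega : ¬ total + x > 0)]
  | cons d rest ih =>
      simp [pvGreedyLoop]
      split_ifs
      · exact ih (total + d) _ (by rw [List.sum_cons] at h; omega)
      · rfl

-- squeeze: running total ≥ 0, the whole remainder cannot go positive anywhere,
-- yet the final sum is ≥ 0 ⇒ every prefix-sum term is 0
theorem pvSum_nonpos (l : List Int) (h : ∀ y ∈ l, y ≤ 0) : l.sum ≤ 0 := by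
  induction l with
  | nil => simp
  | cons z zs ih =>
      have := h z (by simp)
      have := ih (fun y hy => h y (by simp [hy]))
      simp; omega

theorem pvWs_eq_zero (r : List Int) (total : Int) (ht : 0 ≤ total)
    (hs : 0 ≤ total + r.sum) (hall : ∀ y ∈ r, total + y ≤ 0) :
    pvWs r total = 0 := by
  induction r generalizing total with
  | nil => simp [pvWs]
  | cons d rest ih =>
      have hd : total + d ≤ 0 := hall d (by simp)
      have hnp : ∀ y ∈ rest, y ≤ 0 := by
        intro y hy
        have := hall y (by simp [hy])
        omega
      have hsum_np : rest.sum ≤ 0 := pvSum_nonpos rest hnp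
      rw [List.sum_cons] at hs
      have hzero : total + d = 0 := by omega
      have hrec : pvWs rest (total + d) = 0 := by
        apply ih (total + d) (by omega) (by omega)
        intro y hy
        have := hnp y hy
        omega
      rw [hzero] at hrec
      simp [pvWs, hzero, hrec]

-- on a nonincreasing list with nonnegative final total, B never breaks usefully:
-- it returns ans plus ALL prefix sums
theorem pvGreedy_full (r : List Int) (total ans : Int)
    (hsorted : r.Pairwise (fun a b => b ≤ a)) (ht : 0 ≤ total)
    (hs : 0 ≤ total + r.sum) :
    pvGreedyLoop r total ans = ans + pvWs r total := by
  induction r generalizing total ans with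
  | nil => simp [pvGreedyLoop, pvWs]
  | cons d rest ih =>
      rcases List.pairwise_cons.mp hsorted with ⟨hhead, htail⟩
      rw [List.sum_cons] at hs
      by_cases h : total + d > 0
      · have := ih (total + d) (ans + (total + d)) htail (by omega) (by omega)
        simp [pvGreedyLoop, if_pos h, this, pvWs]; ring
      · have hz : pvWs (d :: rest) total = 0 := by
          apply pvWs_eq_zero _ _ ht (by rw [List.sum_cons]; omega)
          intro y hy
          rcases List.mem_cons.mp hy with rfl | hy'
          · omega
          · have := hhead y hy'; omega
        simp [pvGreedyLoop, if_neg h, hz]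

-- the heart: on any ascending-sorted list the two loop pipelines agree
theorem pvMain (l : List Int) (hsorted : l.Pairwise (fun a b => a ≤ b)) :
    pvResLoop (pvSkipLoop l l.sum) 1 0 = pvGreedyLoop l.reverse 0 0 := by
  induction l with
  | nil => simp [pvSkipLoop, pvResLoop, pvGreedyLoop]
  | cons x xs ih =>
      rcases List.pairwise_cons.mp hsorted with ⟨_, htail⟩
      have hsum : (x :: xs).sum = x + xs.sum := List.sum_cons
      by_cases hneg : (x :: xs).sum < 0
      · -- A skips x; B's pass never reaches x usefully either
        have hA : pvSkipLoop (x :: xs) (x :: xs).sum = pvSkipLoop xs xs.sum := by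
          simp only [pvSkipLoop]
          rw [if_pos hneg]
          congr 1
          omega
        have hB : pvGreedyLoop (xs.reverse ++ [x]) 0 0 = pvGreedyLoop xs.reverse 0 0 := by
          apply pvGreedy_append_drop
          rw [List.sum_reverse]
          omega
        rw [hA, List.reverse_cons, hB, ih htail]
      · -- A keeps everything; B keeps everything too (zero-sum tail contributes 0)
        have hA : pvSkipLoop (x :: xs) (x :: xs).sum = x :: xs := by
          simp only [pvSkipLoop]
          rw [if_neg hneg]
        have hrev : (x :: xs).reverse.Pairwise (fun a b => b ≤ a) := by
          rw [List.pairwise_reverse]; exact hsorted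
        have hB := pvGreedy_full (x :: xs).reverse 0 0 hrev le_rfl
          (by rw [List.sum_reverse]; omega)
        rw [hA, hB, pvResLoop_eq, pvPw_one_eq_ws_reverse]

-- ===== VERDICT (by name: the statement is the Claim_ definition above) =====
theorem maxSatisfaction_spec : Claim_equal_maxSatisfaction := by
  intro satisfaction _
  have hs := PySem.List.sorted_pairwise (xs := satisfaction) (key := fun x : Int => x)
  show maxSatisfaction satisfaction = maxSatisfaction_alt satisfaction
  simp only [maxSatisfaction, maxSatisfaction_alt, pvSumLoop_eq, zero_add]
  exact pvMain _ hs
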